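-- pv_equiv track=rewrite | github.com/DevT02/ForgetGate | scripts/4_adv_evaluate.py | resolve_base_suite_info
-- ===== SOURCE A (Python) =====
-- from typing import Dict, Tuple, Optional
--
-- def resolve_base_suite_info(experiment_suites: Dict, suite_name: str) -> Tuple[str, Dict]:
--     """Resolve the base suite that contains dataset/model info, following suite references"""
--     suite = experiment_suites[suite_name]
--
--     if "base_model_suite" in suite:
--         return resolve_base_suite_info(experiment_suites, suite["base_model_suite"])
--     elif "unlearned_model_suite" in suite:
--         return resolve_base_suite_info(experiment_suites, suite["unlearned_model_suite"])
--     else: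
--         return suite_name, suite
-- ===== SOURCE B (Python) =====
-- def resolve_base_suite_info(experiment_suites, suite_name):
--     """Iterative version: walk the reference chain with a while loop."""
--     suite = experiment_suites[suite_name]
--     while True:
--         if "base_model_suite" in suite:
--             suite_name = suite["base_model_suite"]
--         elif "unlearned_model_suite" in suite:
--             suite_name = suite["unlearned_model_suite"]
--         else:
--             return suite_name, suite
--         suite = experiment_suites[suite_name]
-- ===== Notes on version B (the rewrite author's own statement) =====
-- stated objective: idiomatic
-- what changed: Replaced the recursive chain-following with an explicit iterative while-loop that rebinds suite_name/suite, keeping the same branch priority.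
import Mathlib
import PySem

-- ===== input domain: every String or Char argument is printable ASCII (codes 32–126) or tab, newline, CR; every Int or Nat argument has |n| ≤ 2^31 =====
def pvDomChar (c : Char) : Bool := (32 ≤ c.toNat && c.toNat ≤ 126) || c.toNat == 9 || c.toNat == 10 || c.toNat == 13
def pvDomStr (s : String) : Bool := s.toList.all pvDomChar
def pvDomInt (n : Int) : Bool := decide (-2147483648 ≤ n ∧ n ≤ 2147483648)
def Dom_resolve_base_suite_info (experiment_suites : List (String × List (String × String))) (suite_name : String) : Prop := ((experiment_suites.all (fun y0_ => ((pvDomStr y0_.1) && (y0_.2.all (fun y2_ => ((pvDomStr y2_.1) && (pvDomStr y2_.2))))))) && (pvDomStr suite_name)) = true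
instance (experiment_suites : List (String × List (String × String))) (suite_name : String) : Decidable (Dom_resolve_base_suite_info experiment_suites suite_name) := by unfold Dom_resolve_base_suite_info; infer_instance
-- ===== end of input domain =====

-- B rewrites A's recursion as an explicit iterative loop (same branch priority); behaviour is identical.
-- ===== PORT A =====
-- A recurses on the referenced suite name; fuel (experiment_suites.length + 1) bounds the recursion
-- depth, which Pre_ guarantees is sufficient (a terminating chain visits distinct keys).
def pvGoA (experiment_suites : List (String × List (String × String))) : Nat → String → String × (List (String × String))
  | 0, _ => ("", [])
  | fuel + 1, suite_name =>
    match experiment_suites.lookup suite_name with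
    | none => ("", [])  -- KeyError, excluded by Pre_
    | some suite =>
      if (suite.lookup "base_model_suite").isSome then
        pvGoA experiment_suites fuel ((suite.lookup "base_model_suite").getD "")
      else if (suite.lookup "unlearned_model_suite").isSome then
        pvGoA experiment_suites fuel ((suite.lookup "unlearned_model_suite").getD "")
      else
        (suite_name, suite)

def resolve_base_suite_info (experiment_suites : List (String × List (String × String))) (suite_name : String) : String × (List (String × String)) :=
  pvGoA experiment_suites (experiment_suites.length + 1) suite_name

-- ===== PORT B =====
-- the while-loop body: state is (suite_name, suite); fuel bounds the number of loop iterations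
def pvLoopB (experiment_suites : List (String × List (String × String))) : Nat → String → List (String × String) → String × (List (String × String))
  | fuel, suite_name, suite =>
    match suite.lookup "base_model_suite" with
    | some nm =>
      (match fuel with
       | 0 => ("", [])
       | f + 1 =>
         match experiment_suites.lookup nm with
         | none => ("", [])  -- KeyError, excluded by Pre_
         | some s => pvLoopB experiment_suites f nm s)
    | none =>
      match suite.lookup "unlearned_model_suite" with
      | some nm =>
        (match fuel with
         | 0 => ("", [])
         | f + 1 =>
           match experiment_suites.lookup nm with
           | none => ("", [])
           | some s => pvLoopB experiment_suites f nm s)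
      | none => (suite_name, suite)

def resolve_base_suite_info_alt (experiment_suites : List (String × List (String × String))) (suite_name : String) : String × (List (String × String)) :=
  match experiment_suites.lookup suite_name with
  | none => ("", [])
  | some suite => pvLoopB experiment_suites experiment_suites.length suite_name suite

-- ===== PRECONDITION & SPEC =====
-- the reference followed from a suite: base_model_suite first, else unlearned_model_suite
def pvLink (suite : List (String × String)) : Option String :=
  match suite.lookup "base_model_suite" with
  | some nm => some nm
  | none => suite.lookup "unlearned_model_suite"

def pvChainOk (experiment_suites : List (String × List (String × String))) : Nat → String → Bool
  | 0, _ => false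
  | n + 1, suite_name =>
    match experiment_suites.lookup suite_name with
    | none => false
    | some suite =>
      match pvLink suite with
      | none => true
      | some nm => pvChainOk experiment_suites n nm

-- Pre_ = exactly the inputs on which Python A returns: every name on the reference chain is a key
-- and the chain reaches a terminal suite (otherwise A raises KeyError / RecursionError).
def Pre_resolve_base_suite_info (experiment_suites : List (String × List (String × String))) (suite_name : String) : Prop :=
  pvChainOk experiment_suites (experiment_suites.length + 1) suite_name = true
instance (experiment_suites : List (String × List (String × String))) (suite_name : String) : Decidable (Pre_resolve_base_suite_info experiment_suites suite_name) := by unfold Pre_resolve_base_suite_info; infer_instance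

def pvWitness_resolve_base_suite_info : (List (String × List (String × String))) × String :=
  ([("a", [("base_model_suite", "b")]), ("b", [("x", "y")])], "a")

def Spec_resolve_base_suite_info (experiment_suites : List (String × List (String × String))) (suite_name : String) (out : String × (List (String × String))) : Prop := out = resolve_base_suite_info_alt experiment_suites suite_name
instance (experiment_suites : List (String × List (String × String))) (suite_name : String) (out : String × (List (String × String))) : Decidable (Spec_resolve_base_suite_info experiment_suites suite_name out) := by unfold Spec_resolve_base_suite_info; infer_instance

-- ===== CLAIM =====
def Claim_equal_resolve_base_suite_info : Prop := ∀ (experiment_suites : List (String × List (String × String))) (suite_name : String), Dom_resolve_base_suite_info experiment_suites suite_name → Pre_resolve_base_suite_info experiment_suites suite_name → Spec_resolve_base_suite_info experiment_suites suite_name (resolve_base_suite_info experiment_suites suite_name)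

-- ===== LEMMAS AND PROOFS =====
-- with equal fuel, one recursive step of A equals the loop entry of B (holds for every fuel)
theorem pvGoA_eq_loop (experiment_suites : List (String × List (String × String))) :
    ∀ (n : Nat) (suite_name : String),
      pvGoA experiment_suites (n + 1) suite_name =
        match experiment_suites.lookup suite_name with
        | none => ("", [])
        | some suite => pvLoopB experiment_suites n suite_name suite := by
  intro n
  induction n with
  | zero =>
    intro suite_name
    simp only [pvGoA]
    cases experiment_suites.lookup suite_name with
    | none => rfl
    | some suite =>
      change _ = pvLoopB experiment_suites 0 suite_name suite
      conv_rhs => rw [pvLoopB.eq_def]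
      cases hb : suite.lookup "base_model_suite" with
      | some nm => simp [hb]
      | none =>
        cases hu : suite.lookup "unlearned_model_suite" with
        | some nm => simp [hb, hu]
        | none => simp [hb, hu]
  | succ f ih =>
    intro suite_name
    simp only [pvGoA]
    cases experiment_suites.lookup suite_name with
    | none => rfl
    | some suite =>
      change _ = pvLoopB experiment_suites (f + 1) suite_name suite
      conv_rhs => rw [pvLoopB.eq_def]
      cases hb : suite.lookup "base_model_suite" with
      | some nm =>
        simp only [hb, Option.isSome_some, if_true, Option.getD_some]
        exact ih nm
      | none =>
        cases hu : suite.lookup "unlearned_model_suite" with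
        | some nm =>
          simp only [hb, hu, Option.isSome_some, Option.isSome_none, if_true,
            Bool.false_eq_true, if_false, Option.getD_some]
          exact ih nm
        | none => simp [hb, hu]

-- ===== VERDICT =====
theorem resolve_base_suite_info_spec : Claim_equal_resolve_base_suite_info := by
  intro experiment_suites suite_name _ _
  show _ = _
  rw [resolve_base_suite_info, pvGoA_eq_loop, resolve_base_suite_info_alt]
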